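-- pv_equiv track=rewrite | github.com/minimo162/yakulingo | yakulingo/services/translation_service.py | _extract_json_string_partial
-- ===== SOURCE A (Python) =====
-- def _extract_json_string_partial(text: str, start_index: int) -> tuple[str, bool]:
--     """Best-effort extraction for a JSON string value from a partial buffer."""
--     out: list[str] = []
--     escaped = False
--     for ch in text[start_index:]:
--         if escaped:
--             out.append("\\" + ch)
--             escaped = False
--             continue
--         if ch == "\\":
--             escaped = True
--             continue
--         if ch == '"':
--             return "".join(out), True
--         out.append(ch)
--     if escaped:
--         out.append("\\")
--     return "".join(out), False
-- ===== SOURCE B (Python) =====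
-- def _extract_json_string_partial(text: str, start_index: int) -> tuple[str, bool]:
--     """Best-effort extraction for a JSON string value from a partial buffer."""
--     s = text[start_index:]
--     n = len(s)
--     i = 0
--     while i < n:
--         if s[i] == '"':
--             return s[:i], True
--         i += 2 if s[i] == '\\' else 1
--     return s, False
-- ===== Notes on version B (the rewrite author's own statement) =====
-- stated objective: simpler
-- what changed: Replaces the per-character escaped-flag state machine that rebuilds the output by appending (1- and 2-char) pieces with an index-jumping scan (skip 2 past a backslash, 1 otherwise) that locates the cut position and returns a slice of the buffer.
import Mathlib
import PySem

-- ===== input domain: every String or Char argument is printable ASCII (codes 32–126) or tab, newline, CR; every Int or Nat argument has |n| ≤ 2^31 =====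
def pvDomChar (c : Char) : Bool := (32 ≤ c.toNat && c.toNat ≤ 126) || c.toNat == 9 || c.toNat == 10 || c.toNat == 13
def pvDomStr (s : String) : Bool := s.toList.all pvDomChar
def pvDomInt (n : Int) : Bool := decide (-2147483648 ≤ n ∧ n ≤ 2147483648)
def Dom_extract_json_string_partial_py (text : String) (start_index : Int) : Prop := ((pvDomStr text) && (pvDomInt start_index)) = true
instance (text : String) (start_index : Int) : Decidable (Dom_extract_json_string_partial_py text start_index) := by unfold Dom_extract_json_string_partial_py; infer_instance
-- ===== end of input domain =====

-- B replaces A's per-character escaped-flag state machine (which rebuilds the output by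
-- appending) with an index-jumping scan that finds the cut position and returns a slice;
-- objective: simpler/alternative decomposition, not claimed faster.

-- ===== PORT A =====
-- out is kept as the flattened character list of Python's `out` (each appended element is
-- the 1- or 2-char string shown); "".join(out) is String.ofList of that list — exact.
def aLoop (cs : List Char) (out : List Char) (escaped : Bool) : String × Bool :=
  match cs with
  | [] => (String.ofList (if escaped then out ++ ['\\'] else out), false)
  | ch :: rest =>
    if escaped then aLoop rest (out ++ ['\\', ch]) false
    else if ch = '\\' then aLoop rest out true
    else if ch = '"' then (String.ofList out, true)
    else aLoop rest (out ++ [ch]) false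

def extract_json_string_partial_py (text : String) (start_index : Int) : String × Bool :=
  aLoop (PySem.Chars.slice text.toList (some start_index) none) [] false

-- ===== PORT B =====
-- while loop over index i; s[i] is read via getElem under the loop guard i < n (always in
-- range in the Python); s[:i] is s.take i — exact on these nonnegative in-range bounds.
def bLoop (s : List Char) (i : Nat) : String × Bool :=
  if h : i < s.length then
    if s[i] = '"' then (String.ofList (s.take i), true)
    else bLoop s (i + (if s[i] = '\\' then 2 else 1))
  else (String.ofList s, false)
termination_by s.length - i
decreasing_by split <;> omega

def extract_json_string_partial_py_alt (text : String) (start_index : Int) : String × Bool :=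
  bLoop (PySem.Chars.slice text.toList (some start_index) none) 0

-- ===== PRECONDITION & SPEC =====
def Spec_extract_json_string_partial_py (text : String) (start_index : Int) (out : String × Bool) : Prop := out = extract_json_string_partial_py_alt text start_index
instance (text : String) (start_index : Int) (out : String × Bool) : Decidable (Spec_extract_json_string_partial_py text start_index out) := by unfold Spec_extract_json_string_partial_py; infer_instance

-- ===== CLAIM (what is proved, stated in full; the proofs are below) =====
def Claim_equal_extract_json_string_partial_py : Prop := ∀ (text : String) (start_index : Int), Dom_extract_json_string_partial_py text start_index → Spec_extract_json_string_partial_py text start_index (extract_json_string_partial_py text start_index)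

-- ===== LEMMAS AND PROOFS =====

-- Position of the first unescaped quote (None if the string ends first), tracking the
-- escaped flag; the common characterisation both loops are reduced to.
def jumpE : Bool → List Char → Option Nat
  | true, [] => none
  | true, _ :: rest => (jumpE false rest).map (· + 1)
  | false, [] => none
  | false, c :: rest =>
    if c = '"' then some 0
    else if c = '\\' then (jumpE true rest).map (· + 1)
    else (jumpE false rest).map (· + 1)

theorem aLoop_eq (cs : List Char) : ∀ (out : List Char) (esc : Bool),
    aLoop cs out esc =
      match jumpE esc cs with
      | some k => (String.ofList (out ++ (if esc then '\\' :: cs.take k else cs.take k)), true)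
      | none => (String.ofList (out ++ (if esc then '\\' :: cs else cs)), false) := by
  induction cs with
  | nil =>
    intro out esc
    cases esc <;> simp [aLoop, jumpE]
  | cons c rest ih =>
    intro out esc
    cases esc with
    | true =>
      simp only [aLoop, jumpE, ih]
      cases h : jumpE false rest <;> simp
    | false =>
      by_cases hq : c = '"'
      · simp [aLoop, jumpE, hq]
      · by_cases hb : c = '\\'
        · simp only [aLoop, jumpE, hb, if_true, ih]
          cases h : jumpE true rest <;> simp
        · simp only [aLoop, jumpE, if_neg hq, if_neg hb, ih]
          cases h : jumpE false rest <;> simp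

theorem bLoop_eq (s : List Char) (i : Nat) :
    bLoop s i =
      match jumpE false (s.drop i) with
      | some k => (String.ofList (s.take (i + k)), true)
      | none => (String.ofList s, false) := by
  by_cases h : i < s.length
  · have hdrop : s.drop i = s[i] :: s.drop (i + 1) := List.drop_eq_getElem_cons h
    rw [bLoop]
    by_cases hq : s[i] = '"'
    · simp [h, hq, hdrop, jumpE]
    · by_cases hb : s[i] = '\\'
      · by_cases h2 : i + 1 < s.length
        · have hdrop2 : s.drop (i + 1) = s[i+1] :: s.drop (i + 2) :=
            List.drop_eq_getElem_cons h2
          have hrec := bLoop_eq s (i + 2)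
          simp only [h, hb, dif_pos, ite_true, ite_false, if_false, hdrop, hdrop2, jumpE]
          rw [hrec]
          cases hj : jumpE false (s.drop (i + 2)) <;>
            simp [Nat.add_comm, Nat.add_left_comm]
        · have hdrop2 : s.drop (i + 1) = [] := by
            apply List.drop_eq_nil_of_le; omega
          have hge : ¬ i + 2 < s.length := by omega
          have hrec : bLoop s (i + 2) = (String.ofList s, false) := by
            rw [bLoop]; simp [hge]
          simp [h, hb, hrec, hdrop, hdrop2, jumpE]
      · have hrec := bLoop_eq s (i + 1)
        simp only [h, hq, hb, dif_pos, ite_false, if_false, hdrop, jumpE]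
        rw [hrec]
        cases hj : jumpE false (s.drop (i + 1)) <;>
          simp [Nat.add_comm, Nat.add_left_comm]
  · have hdrop : s.drop i = [] := by apply List.drop_eq_nil_of_le; omega
    rw [bLoop]
    simp [h, hdrop, jumpE]
termination_by s.length - i
decreasing_by all_goals omega

-- ===== VERDICT (by name: the statement is the Claim_ definition above) =====
theorem extract_json_string_partial_py_spec : Claim_equal_extract_json_string_partial_py := by
  intro text start_index _
  unfold Spec_extract_json_string_partial_py
  unfold extract_json_string_partial_py extract_json_string_partial_py_alt
  rw [aLoop_eq, bLoop_eq]
  simp only [PySem.Chars.slice_eq_listSlice, List.drop_zero]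
  cases h : jumpE false (PySem.List.slice text.toList (some start_index) none) <;> simp
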